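-- pv_equiv track=rewrite | github.com/fjemi/mono_repo | functions/games/sudoku/_refactoring/_utils.py | convert_grid_to_list
-- ===== SOURCE A (Python) =====
-- from typing import Dict, List
--
-- def convert_grid_to_list(
--   grid: Dict[str, int],
--   n: int,
-- ) -> List[List[int]]:
--   if grid in [None, []]:
--     return []
--
--   store = [[] for i in range(n)]
--   for position in grid:
--     i = position.split('.')[0]
--     i = int(i)
--     store[i].append(grid[position])
--   return store
-- ===== SOURCE B (Python) =====
-- def convert_grid_to_list(
--   grid,
--   n,
-- ):
--   if grid in [None, []]:
--     return []
--   return [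
--     [grid[p] for p in grid if int(p.split('.')[0]) == i]
--     for i in range(n)
--   ]
-- ===== Notes on version B (the rewrite author's own statement) =====
-- stated objective: simpler
-- what changed: Replaced the scatter pass that appends into n preallocated mutable buckets with a single nested comprehension that builds each row directly as a filter of the dict entries by parsed row index.
-- intended difference: On grids containing a key whose row index parses to a negative i with -n <= i < 0, A silently appends that value to row n+i via Python negative-index wraparound, while B places it in no row; B's behaviour is intended because row positions are non-negative indices. — e.g. on convert_grid_to_list(some [("-1.0", 7)], 2): A returns [[], [7]], B returns [[], []]
import Mathlib
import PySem

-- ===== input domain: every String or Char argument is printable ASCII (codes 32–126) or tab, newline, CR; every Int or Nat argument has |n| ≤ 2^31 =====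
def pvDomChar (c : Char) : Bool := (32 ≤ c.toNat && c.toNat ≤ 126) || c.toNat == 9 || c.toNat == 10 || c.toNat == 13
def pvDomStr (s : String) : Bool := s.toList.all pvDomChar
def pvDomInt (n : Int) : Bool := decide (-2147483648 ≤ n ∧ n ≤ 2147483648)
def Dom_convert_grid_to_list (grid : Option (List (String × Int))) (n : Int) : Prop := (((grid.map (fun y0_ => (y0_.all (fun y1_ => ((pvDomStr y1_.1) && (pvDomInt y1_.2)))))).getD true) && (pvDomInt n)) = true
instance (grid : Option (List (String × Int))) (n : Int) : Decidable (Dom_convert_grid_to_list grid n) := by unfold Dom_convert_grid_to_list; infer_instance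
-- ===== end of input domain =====

-- B replaces A's scatter-into-preallocated-buckets pass with one nested per-row filter
-- comprehension (objective: simpler). Equality of RETURN values is what is proved.

-- int(position.split('.')[0]) — shared key-parsing, used by both ports (it is the same
-- expression in both Python sources); none = ValueError.
def pvRowIdx (s : String) : Option Int :=
  PySem.Int.ofStr? (((PySem.Str.split? s ".").getD []).getD 0 "")

-- ===== PORT A =====
-- 'for position in grid' iterates the dict's keys; 'grid[position]' is the item's value
-- (dict keys are unique), so the loop is a fold over the dict's items.
def convert_grid_to_list (grid : Option (List (String × Int))) (n : Int) : List (List Int) :=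
  match grid with
  | none => []   -- 'grid in [None, []]': a dict never equals [], so only None hits this branch
  | some g =>
    (PySem.Dict.ofList g).items.foldl
      (fun store kv =>
        match pvRowIdx kv.1 with
        | none => store   -- int() ValueError: input excluded by Pre_
        | some i =>
          -- store[i].append(...): pySetD/pyGetD are Python indexing (negative i wraps);
          -- out-of-range i (IndexError) is excluded by Pre_
          PySem.List.pySetD store i (PySem.List.pyGetD store i [] ++ [kv.2]))
      ((PySem.List.pyRange 0 n 1).map (fun _ => ([] : List Int)))

-- ===== PORT B =====
def convert_grid_to_list_alt (grid : Option (List (String × Int))) (n : Int) : List (List Int) :=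
  match grid with
  | none => []
  | some g =>
    (PySem.List.pyRange 0 n 1).map (fun i =>
      (PySem.Dict.ofList g).items.filterMap (fun kv =>
        match pvRowIdx kv.1 with
        | some j => if j = i then some kv.2 else none
        | none => none))

-- ===== PRECONDITION & SPEC =====
-- Pre_ excludes exactly the inputs where A raises: a key on which int() fails (ValueError)
-- or whose parsed row index is outside [-n, n) (IndexError).
def Pre_convert_grid_to_list (grid : Option (List (String × Int))) (n : Int) : Prop :=
  ∀ kv ∈ (PySem.Dict.ofList (grid.getD [])).items,
    ∃ i ∈ (pvRowIdx kv.1).toList, -n ≤ i ∧ i < n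
instance (grid : Option (List (String × Int))) (n : Int) : Decidable (Pre_convert_grid_to_list grid n) := by unfold Pre_convert_grid_to_list; infer_instance

def pvWitness_convert_grid_to_list : (Option (List (String × Int))) × Int :=
  (some [("0.0", 5), ("1.2", 3)], 2)

-- On grids containing a key whose row index parses to a negative i with -n ≤ i < 0, A silently
-- appends that value to row n+i via Python negative-index wraparound, while B places it in no
-- row; B's behaviour is intended because row positions are non-negative indices.
def D_convert_grid_to_list (grid : Option (List (String × Int))) (n : Int) : Prop :=
  ∃ kv ∈ (PySem.Dict.ofList (grid.getD [])).items,
    ∃ i ∈ (pvRowIdx kv.1).toList, -n ≤ i ∧ i < 0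
instance (grid : Option (List (String × Int))) (n : Int) : Decidable (D_convert_grid_to_list grid n) := by unfold D_convert_grid_to_list; infer_instance

def Spec_convert_grid_to_list (grid : Option (List (String × Int))) (n : Int) (out : List (List Int)) : Prop := ¬ D_convert_grid_to_list grid n → out = convert_grid_to_list_alt grid n
instance (grid : Option (List (String × Int))) (n : Int) (out : List (List Int)) : Decidable (Spec_convert_grid_to_list grid n out) := by unfold Spec_convert_grid_to_list; infer_instance

def pvDiffWitness_convert_grid_to_list : (Option (List (String × Int))) × Int :=
  (some [("-1.0", 7)], 2)
def pvDiffWitnessOut_convert_grid_to_list : (List (List Int)) × (List (List Int)) :=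
  ([[], [7]], [[], []])

-- ===== CLAIM (what is proved, stated in full; the proofs are below) =====
def Claim_unchanged_convert_grid_to_list : Prop := ∀ (grid : Option (List (String × Int))) (n : Int), Dom_convert_grid_to_list grid n → Pre_convert_grid_to_list grid n → Spec_convert_grid_to_list grid n (convert_grid_to_list grid n)
def Claim_changed_convert_grid_to_list : Prop := Dom_convert_grid_to_list (pvDiffWitness_convert_grid_to_list.1) (pvDiffWitness_convert_grid_to_list.2) ∧ Pre_convert_grid_to_list (pvDiffWitness_convert_grid_to_list.1) (pvDiffWitness_convert_grid_to_list.2) ∧ D_convert_grid_to_list (pvDiffWitness_convert_grid_to_list.1) (pvDiffWitness_convert_grid_to_list.2) ∧ convert_grid_to_list (pvDiffWitness_convert_grid_to_list.1) (pvDiffWitness_convert_grid_to_list.2) = pvDiffWitnessOut_convert_grid_to_list.1 ∧ convert_grid_to_list_alt (pvDiffWitness_convert_grid_to_list.1) (pvDiffWitness_convert_grid_to_list.2) = pvDiffWitnessOut_convert_grid_to_list.2 ∧ pvDiffWitnessOut_convert_grid_to_list.1 ≠ pvDiffWitnessOut_convert_grid_to_list.2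

def Claim_exact_convert_grid_to_list : Prop := ∀ (grid : Option (List (String × Int))) (n : Int), Dom_convert_grid_to_list grid n → Pre_convert_grid_to_list grid n → D_convert_grid_to_list grid n → convert_grid_to_list grid n ≠ convert_grid_to_list_alt grid n

-- ===== LEMMAS AND PROOFS =====

-- Characterisation of A's scatter loop when every key's row index is in [0, len store):
-- row j of the result is row j of store followed by the values whose key parses to j.
lemma pv_fold_char (ps : List (String × Int)) :
    ∀ (store : List (List Int)),
    (∀ kv ∈ ps, ∃ i, pvRowIdx kv.1 = some i ∧ 0 ≤ i ∧ i < (store.length : Int)) →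
    (ps.foldl
      (fun store kv =>
        match pvRowIdx kv.1 with
        | none => store
        | some i => PySem.List.pySetD store i (PySem.List.pyGetD store i [] ++ [kv.2]))
      store)
    = (List.range store.length).map (fun (j : Nat) =>
        store[j]! ++ ps.filterMap (fun kv =>
          match pvRowIdx kv.1 with
          | some t => if t = (j : Int) then some kv.2 else none
          | none => none)) := by
  induction ps with
  | nil =>
    intro store _
    simp only [List.foldl_nil, List.filterMap_nil, List.append_nil]
    apply List.ext_getElem (by simp)
    intro j h1 h2
    simp [List.getElem!_eq_getElem?_getD, List.getElem?_eq_getElem (by simpa using h2)]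
  | cons kv rest ih =>
    intro store H
    obtain ⟨i, hp, h0, hlt⟩ := H kv (List.mem_cons_self)
    have hlt' : i.toNat < store.length := by omega
    have hstep :
        (match pvRowIdx kv.1 with
          | none => store
          | some i => PySem.List.pySetD store i (PySem.List.pyGetD store i [] ++ [kv.2]))
        = store.set i.toNat (store[i.toNat] ++ [kv.2]) := by
      rw [hp]
      show PySem.List.pySetD store i (PySem.List.pyGetD store i [] ++ [kv.2]) = _
      rw [PySem.List.pyGetD_eq_getElem store [] h0 (by simpa using hlt),
          PySem.List.pySetD_of_nonneg store _ h0]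
    rw [List.foldl_cons, hstep]
    rw [ih _ (by
      intro kv' hm
      obtain ⟨i', hp', h0', hlt2⟩ := H kv' (List.mem_cons_of_mem _ hm)
      exact ⟨i', hp', h0', by simpa using hlt2⟩)]
    rw [List.length_set]
    apply List.map_congr_left
    intro j hj
    have hjlen : j < store.length := by simpa [List.length_set] using List.mem_range.mp hj
    rw [List.filterMap_cons]
    by_cases hji : j = i.toNat
    · have hij : i = (j : Int) := by omega
      simp only [hp, hij, Int.toNat_natCast]
      rw [List.getElem!_eq_getElem?_getD, List.getElem?_set_self']
      simp [List.getElem?_eq_getElem hjlen, List.getElem!_eq_getElem?_getD]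
    · have hne : ¬ (i = (j : Int)) := by omega
      simp only [hp, if_neg hne]
      rw [List.getElem!_eq_getElem?_getD, List.getElem?_set_ne (by omega)]
      simp [List.getElem!_eq_getElem?_getD]

-- Python-index normalisation and the wraparound characterisation of A's loop (for tightness).
def pvSlot (len : Nat) (i : Int) : Nat := if i < 0 then len - (-i).toNat else i.toNat

lemma pvIdx_eq (len : Nat) (i : Int) (h1 : -(len:Int) ≤ i) (h2 : i < (len:Int)) :
    PySem.List.pyIdx? len i = some (pvSlot len i) := by
  simp only [PySem.List.pyIdx?, pvSlot]
  split_ifs <;> first | rfl | omega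

lemma pvSlot_lt (len : Nat) (i : Int) (h1 : -(len:Int) ≤ i) (h2 : i < (len:Int)) :
    pvSlot len i < len := by
  unfold pvSlot; split_ifs <;> omega

lemma pvSetD_eq {α : Type} (xs : List α) (i : Int) (v : α)
    (h1 : -(xs.length:Int) ≤ i) (h2 : i < (xs.length:Int)) :
    PySem.List.pySetD xs i v = xs.set (pvSlot xs.length i) v := by
  simp [PySem.List.pySetD, PySem.List.pySet?, pvIdx_eq _ _ h1 h2]

lemma pvGetD_eq {α : Type} (xs : List α) (i : Int) (d : α)
    (h1 : -(xs.length:Int) ≤ i) (h2 : i < (xs.length:Int)) :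
    PySem.List.pyGetD xs i d = xs[pvSlot xs.length i]'(pvSlot_lt _ _ h1 h2) := by
  simp [PySem.List.pyGetD, PySem.List.pyGet?, pvIdx_eq _ _ h1 h2,
    List.getElem?_eq_getElem (pvSlot_lt _ _ h1 h2)]

lemma pv_fold_charW (L : Nat) (ps : List (String × Int)) :
    ∀ (store : List (List Int)), store.length = L →
    (∀ kv ∈ ps, ∃ i, pvRowIdx kv.1 = some i ∧ -(L:Int) ≤ i ∧ i < (L:Int)) →
    (ps.foldl
      (fun store kv =>
        match pvRowIdx kv.1 with
        | none => store
        | some i => PySem.List.pySetD store i (PySem.List.pyGetD store i [] ++ [kv.2]))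
      store)
    = (List.range L).map (fun (j : Nat) =>
        store[j]! ++ ps.filterMap (fun kv =>
          match pvRowIdx kv.1 with
          | some t => if pvSlot L t = j then some kv.2 else none
          | none => none)) := by
  induction ps with
  | nil =>
    intro store hL _
    subst hL
    simp only [List.foldl_nil, List.filterMap_nil, List.append_nil]
    apply List.ext_getElem (by simp)
    intro j h1 h2
    simp [List.getElem!_eq_getElem?_getD, List.getElem?_eq_getElem (by simpa using h2)]
  | cons kv rest ih =>
    intro store hL H
    subst hL
    obtain ⟨i, hp, h0, hlt⟩ := H kv (List.mem_cons_self)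
    have hslt : pvSlot store.length i < store.length := pvSlot_lt _ _ h0 hlt
    have hstep :
        (match pvRowIdx kv.1 with
          | none => store
          | some i => PySem.List.pySetD store i (PySem.List.pyGetD store i [] ++ [kv.2]))
        = store.set (pvSlot store.length i) (store[pvSlot store.length i] ++ [kv.2]) := by
      rw [hp]
      show PySem.List.pySetD store i (PySem.List.pyGetD store i [] ++ [kv.2]) = _
      rw [pvGetD_eq store i [] h0 hlt, pvSetD_eq store i _ h0 hlt]
    rw [List.foldl_cons, hstep]
    rw [ih _ (by rw [List.length_set]) (by
      intro kv' hm
      obtain ⟨i', hp', h0', hlt2⟩ := H kv' (List.mem_cons_of_mem _ hm)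
      exact ⟨i', hp', by simpa [List.length_set] using h0', by simpa [List.length_set] using hlt2⟩)]
    apply List.map_congr_left
    intro j hj
    have hjlen : j < store.length := List.mem_range.mp hj
    rw [List.filterMap_cons]
    by_cases hji : j = pvSlot store.length i
    · simp only [hp, hji]
      rw [List.getElem!_eq_getElem?_getD, List.getElem?_set_self']
      simp [List.getElem?_eq_getElem hslt, List.getElem!_eq_getElem?_getD]
    · have hne : ¬ (pvSlot store.length i = j) := fun h => hji h.symm
      simp only [hp, if_neg hne]
      rw [List.getElem!_eq_getElem?_getD, List.getElem?_set_ne (fun h => hji h.symm)]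
      simp [List.getElem!_eq_getElem?_getD]

lemma pv_store_get (n : Int) (j : Nat) (hj : j < n.toNat) :
    ((PySem.List.pyRange 0 n 1).map (fun _ => ([] : List Int)))[j]! = [] := by
  rw [List.getElem!_eq_getElem?_getD, List.getElem?_map]
  have : j < (PySem.List.pyRange 0 n 1).length := by
    simp [PySem.List.length_pyRange_one]; omega
  simp [List.getElem?_eq_getElem this]


-- ===== VERDICT (by name: the statement is the Claim_ definition above) =====
theorem convert_grid_to_list_spec : Claim_unchanged_convert_grid_to_list := by
  intro grid n _ hpre hnd
  cases grid with
  | none => rfl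
  | some g =>
    simp only [convert_grid_to_list, convert_grid_to_list_alt]
    by_cases hemp : (PySem.Dict.ofList g).items = []
    · simp [hemp]
    · -- some item exists, so its parsed index gives -n ≤ i < n, hence 0 < n
      obtain ⟨kv0, hkv0⟩ := List.exists_mem_of_ne_nil _ hemp
      obtain ⟨i0, hi0m, hi0a, hi0b⟩ := hpre kv0 hkv0
      have hnpos : 0 < n := by omega
      have hsl : ((PySem.List.pyRange 0 n 1).map (fun _ => ([] : List Int))).length = n.toNat := by
        simp [PySem.List.length_pyRange_one]
      rw [pv_fold_char _ _ (by
        intro kv hm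
        obtain ⟨i, him, ha, hb⟩ := hpre kv hm
        rw [Option.mem_toList] at him
        refine ⟨i, him, ?_, ?_⟩
        · by_contra hneg
          exact hnd ⟨kv, hm, i, by simpa [Option.mem_toList] using him, ha, by omega⟩
        · rw [hsl]; omega)]
      rw [hsl]
      simp only [PySem.List.pyRange_one, List.map_map, sub_zero, zero_add]
      apply List.map_congr_left
      intro j hj
      have hjlt : j < n.toNat := List.mem_range.mp hj
      have hget : ∀ {α : Type} [Inhabited α] (f : ℕ → α) (m : ℕ), j < m →
          (List.map f (List.range m))[j]! = f j := by
        intro α _ f m hjm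
        rw [List.getElem!_eq_getElem?_getD, List.getElem?_map, List.getElem?_range hjm]
        rfl
      rw [hget _ _ hjlt]
      simp

theorem convert_grid_to_list_changed : Claim_changed_convert_grid_to_list := by
  unfold Claim_changed_convert_grid_to_list; decide

theorem convert_grid_to_list_tight : Claim_exact_convert_grid_to_list := by
  intro grid n _ hpre hD
  cases grid with
  | none =>
    exfalso
    obtain ⟨kv, hm, _⟩ := hD
    have : (PySem.Dict.ofList ((none : Option (List (String × Int))).getD [])).items = [] := rfl
    rw [this] at hm
    exact List.not_mem_nil hm
  | some g =>
    intro hAB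
    obtain ⟨kv0, hm0, i0, hi0, h0a, h0b⟩ := hD
    rw [Option.mem_toList] at hi0
    have hn : 0 < n := by omega
    set N := n.toNat with hN
    have hNn : (N:Int) = n := Int.toNat_of_nonneg hn.le
    simp only [convert_grid_to_list, convert_grid_to_list_alt] at hAB
    rw [pv_fold_charW N _ _ (by simp [PySem.List.length_pyRange_one]; omega) (by
      intro kv hm
      obtain ⟨i, him, ha, hb⟩ := hpre kv hm
      rw [Option.mem_toList] at him
      exact ⟨i, him, by omega, by omega⟩)] at hAB
    rw [← hNn] at hAB
    set j0 := pvSlot N i0 with hj0def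
    have hj0 : j0 < N := pvSlot_lt N i0 (by omega) (by omega)
    have hrow := congrArg (fun l => l[j0]?) hAB
    beta_reduce at hrow
    rw [PySem.List.getElem?_map_pyRange_zero _ N j0 hj0] at hrow
    simp only [List.getElem?_map, List.getElem?_range hj0, Option.map_some] at hrow
    have hrow' := Option.some.inj hrow
    rw [pv_store_get (N:Int) j0 (by simpa), List.nil_append] at hrow'
    have hlen := congrArg List.length hrow'
    rw [List.length_filterMap_eq_countP, List.length_filterMap_eq_countP] at hlen
    have hm0' : kv0 ∈ (PySem.Dict.ofList g).items := hm0
    obtain ⟨l1, l2, hsplit⟩ := List.append_of_mem hm0'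
    rw [hsplit, List.countP_append, List.countP_append, List.countP_cons, List.countP_cons] at hlen
    have hA0 : (Option.isSome (match pvRowIdx kv0.1 with
        | some t => if pvSlot N t = j0 then some kv0.2 else none
        | none => none)) = true := by
      rw [hi0]; simp [hj0def]
    have hB0 : (Option.isSome (match pvRowIdx kv0.1 with
        | some t => if t = ((j0:Nat):Int) then some kv0.2 else none
        | none => none)) = false := by
      rw [hi0]
      have hne : ¬ (i0 = ((j0:Nat):Int)) := by omega
      simp [hne]
    have hmono : ∀ (l : List (String × Int)),
        l.countP (fun kv => Option.isSome (match pvRowIdx kv.1 with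
          | some t => if t = ((j0:Nat):Int) then some kv.2 else none
          | none => none))
        ≤ l.countP (fun kv => Option.isSome (match pvRowIdx kv.1 with
          | some t => if pvSlot N t = j0 then some kv.2 else none
          | none => none)) := by
      intro l
      apply List.countP_mono_left
      intro kv _ h
      cases hpk : pvRowIdx kv.1 with
      | none => simp [hpk] at h
      | some t =>
        simp only [hpk] at h ⊢
        by_cases ht : t = ((j0:Nat):Int)
        · subst ht
          simp [pvSlot]
        · simp [ht] at h
    have h1 := hmono l1
    have h2 := hmono l2
    simp [hA0, hB0] at hlen
    omega
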